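-- pv_equiv track=rewrite | github.com/weiwei3381/short_video | app.py | sort_shuffle
-- ===== SOURCE A (Python) =====
-- def sort_shuffle(l, circle=3):
--     new_l = []
--     for start_i in range(circle):
--         i = start_i
--         while (1):
--             if i < len(l):
--                 new_l.append(l[i])
--                 i += circle
--             else:
--                 break
--     return new_l
-- ===== SOURCE B (Python) =====
-- def sort_shuffle(l, circle=3):
--     # One linear pass: distribute elements into per-residue buckets, then concatenate.
--     if circle <= 0:
--         return []
--     buckets = [[] for _ in range(circle)]
--     for i, x in enumerate(l):
--         buckets[i % circle].append(x)
--     result = []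
--     for b in buckets:
--         result.extend(b)
--     return result
-- ===== Notes on version B (the rewrite author's own statement) =====
-- stated objective: alternative
-- what changed: B replaces A's circle-many strided scans of the list (one pass per residue class) with a single enumerate pass that distributes elements into per-residue buckets and then concatenates the buckets.
import Mathlib
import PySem

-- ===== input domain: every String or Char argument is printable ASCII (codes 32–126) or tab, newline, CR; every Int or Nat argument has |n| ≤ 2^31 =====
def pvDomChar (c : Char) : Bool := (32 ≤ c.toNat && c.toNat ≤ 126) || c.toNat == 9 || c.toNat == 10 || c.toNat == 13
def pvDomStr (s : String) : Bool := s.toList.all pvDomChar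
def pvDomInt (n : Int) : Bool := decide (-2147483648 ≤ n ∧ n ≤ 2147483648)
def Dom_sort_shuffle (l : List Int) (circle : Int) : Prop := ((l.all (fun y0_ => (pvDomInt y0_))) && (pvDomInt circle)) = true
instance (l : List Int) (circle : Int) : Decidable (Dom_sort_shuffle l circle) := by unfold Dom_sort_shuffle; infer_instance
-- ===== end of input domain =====

-- B replaces A's circle-many strided rescans of the list with one linear bucket-distributing pass; equivalence of the return values is proved (neither version mutates its argument).

-- ===== PORT A =====
-- inner 'while (1)' loop of A; the fuel argument only makes the identical computation
-- total: inside the range-loop circle ≥ 1, so i grows each step and l.length + 1 steps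
-- always reach the break (proved in pvWhileA_eq_every).
def pvWhileA (l : List Int) (circle : Int) : Nat → Int → List Int
  | 0, _ => []
  | fuel + 1, i =>
    if i < (l.length : Int) then
      ((PySem.List.pyGet? l i).getD 0) :: pvWhileA l circle fuel (i + circle)
    else []

def sort_shuffle (l : List Int) (circle : Int) : List Int :=
  (PySem.List.pyRange 0 circle 1).foldl
    (fun new_l start_i => new_l ++ pvWhileA l circle (l.length + 1) start_i) []

-- ===== PORT B =====
def sort_shuffle_alt (l : List Int) (circle : Int) : List Int :=
  if circle ≤ 0 then []
  else
    -- buckets = [[] for _ in range(circle)]; for i, x in enumerate(l): buckets[i % circle].append(x)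
    let buckets :=
      (PySem.List.enumerate l 0).foldl
        (fun bs p => bs.modify (PySem.Int.mod p.1 circle).toNat (fun b => b ++ [p.2]))
        (List.replicate circle.toNat [])
    -- result = []; for b in buckets: result.extend(b)
    buckets.foldl (fun r b => r ++ b) []

-- ===== PRECONDITION & SPEC =====
def Spec_sort_shuffle (l : List Int) (circle : Int) (out : List Int) : Prop := out = sort_shuffle_alt l circle
instance (l : List Int) (circle : Int) (out : List Int) : Decidable (Spec_sort_shuffle l circle out) := by unfold Spec_sort_shuffle; infer_instance

-- ===== CLAIM (what is proved, stated in full; the proofs are below) =====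
def Claim_equal_sort_shuffle : Prop := ∀ (l : List Int) (circle : Int), Dom_sort_shuffle l circle → Spec_sort_shuffle l circle (sort_shuffle l circle)

-- ===== LEMMAS AND PROOFS =====

-- common specification: every (c)-th element of a list, starting at its head
def pvEvery (c : Nat) : List Int → List Int
  | [] => []
  | x :: xs => x :: pvEvery c (xs.drop (c - 1))
  termination_by l => l.length
  decreasing_by simp only [List.length_cons, List.length_drop]; omega

theorem pvEvery_nil (c : Nat) : pvEvery c [] = [] := by rw [pvEvery.eq_def]

theorem pvEvery_cons (c : Nat) (x : Int) (xs : List Int) :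
    pvEvery c (x :: xs) = x :: pvEvery c (xs.drop (c - 1)) := by rw [pvEvery.eq_def]

theorem pvModNat (k c : Int) (hk : 0 ≤ k) (hc : 1 ≤ c) :
    (PySem.Int.mod k c).toNat = k.toNat % c.toNat := by
  rw [PySem.Int.mod_eq_emod_of_pos (by omega)]
  conv_lhs => rw [show k = ((k.toNat : Nat) : Int) by omega, show c = ((c.toNat : Nat) : Int) by omega]
  rw [← Int.natCast_mod]
  omega

-- A's inner loop computes pvEvery of the suffix starting at i
theorem pvWhileA_eq_every (l : List Int) (circle : Int) (hc : 1 ≤ circle) :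
    ∀ (fuel : Nat) (i : Int), 0 ≤ i → l.length ≤ i.toNat + fuel →
      pvWhileA l circle fuel i = pvEvery circle.toNat (l.drop i.toNat) := by
  intro fuel
  induction fuel with
  | zero =>
    intro i hi hf
    have : l.drop i.toNat = [] := List.drop_eq_nil_of_le (by omega)
    simp [pvWhileA, this, pvEvery_nil]
  | succ f ih =>
    intro i hi hf
    rw [pvWhileA]
    by_cases hlt : i < (l.length : Int)
    · have hidx : i.toNat < l.length := by omega
      have hget : PySem.List.pyGet? l i = some l[i.toNat] := by
        simp [PySem.List.pyGet?, PySem.List.pyIdx?, hi, hlt]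
      have hdrop : l.drop i.toNat = l[i.toNat] :: l.drop (i.toNat + 1) := by
        rw [List.drop_eq_getElem_cons hidx]
      rw [if_pos hlt, hget, hdrop, pvEvery_cons]
      have h1 : (l.drop (i.toNat + 1)).drop (circle.toNat - 1) = l.drop (i + circle).toNat := by
        rw [List.drop_drop]
        congr 1
        omega
      rw [h1, ih (i + circle) (by omega) (by omega)]
      simp
    · rw [if_neg hlt]
      have : l.drop i.toNat = [] := List.drop_eq_nil_of_le (by omega)
      rw [this, pvEvery_nil]

-- A equals the flatMap of pvEvery over the residues 0..circle-1
theorem sort_shuffle_char (l : List Int) (circle : Int) (hc : 1 ≤ circle) :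
    sort_shuffle l circle
      = (List.range circle.toNat).flatMap (fun s => pvEvery circle.toNat (l.drop s)) := by
  unfold sort_shuffle
  rw [PySem.List.foldl_append_eq_flatMap, List.nil_append, PySem.List.pyRange_one,
    List.flatMap_map]
  simp only [Int.sub_zero]
  rw [List.flatMap_def, List.flatMap_def]
  congr 1
  apply List.map_congr_left
  intro s _
  rw [pvWhileA_eq_every l circle hc (l.length + 1) ((0 : Int) + s) (by omega) (by omega),
    show ((0 : Int) + (s : Int)).toNat = s from by omega]

-- the bucket fold, pointwise: bucket j collects (in order) the ps-entries whose index is ≡ j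
theorem pvBuckets_getElem? (circle : Int) :
    ∀ (ps : List (Int × Int)) (bs : List (List Int)) (j : Nat),
      (∀ p ∈ ps, 0 ≤ p.1) →
      (ps.foldl (fun bs p => bs.modify (PySem.Int.mod p.1 circle).toNat (fun b => b ++ [p.2])) bs)[j]?
        = bs[j]?.map (fun b => b ++ (ps.filter (fun p => (PySem.Int.mod p.1 circle).toNat = j)).map (·.2)) := by
  intro ps
  induction ps with
  | nil => intro bs j _; simp
  | cons p ps ih =>
    intro bs j hpos
    rw [List.foldl_cons, List.filter_cons,
      ih (bs.modify (PySem.Int.mod p.1 circle).toNat (fun b => b ++ [p.2])) j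
        (fun q hq => hpos q (List.mem_cons_of_mem _ hq))]
    rw [List.getElem?_modify]
    by_cases hj : (PySem.Int.mod p.1 circle).toNat = j
    · cases bs[j]? <;> simp [hj]
    · cases bs[j]? <;> simp [hj]

-- the entries of enumerate at residue j (scanning d positions before the first hit) are pvEvery of the d-dropped suffix
theorem pvFilter_enumerate_eq_every (circle : Int) (hc : 1 ≤ circle) (j : Nat)
    (hj : j < circle.toNat) :
    ∀ (l : List Int) (k : Int) (d : Nat), 0 ≤ k → d < circle.toNat →
      (k.toNat + d) % circle.toNat = j →
      ((PySem.List.enumerate l k).filter (fun p => (PySem.Int.mod p.1 circle).toNat = j)).map (·.2)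
        = pvEvery circle.toNat (l.drop d) := by
  intro l
  induction l with
  | nil => intro k d _ _ _; simp [PySem.List.enumerate_nil, pvEvery_nil]
  | cons x xs ih =>
    intro k d hk hd hsum
    rw [PySem.List.enumerate_cons, List.filter_cons]
    have hmod : (PySem.Int.mod k circle).toNat = k.toNat % circle.toNat := pvModNat k circle hk hc
    by_cases hd0 : d = 0
    · subst hd0
      have htest : (PySem.Int.mod k circle).toNat = j := by
        rw [hmod]; simpa using hsum
      rw [if_pos (by simpa using htest)]
      simp only [List.map_cons]
      rw [ih (k + 1) (circle.toNat - 1) (by omega) (by omega)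
        (by
          have h1 : (k + 1).toNat + (circle.toNat - 1) = k.toNat + circle.toNat := by omega
          rw [h1, Nat.add_mod_right]
          simpa using hsum)]
      rw [List.drop_zero, pvEvery_cons]
    · have hne : (PySem.Int.mod k circle).toNat ≠ j := by
        rw [hmod]
        intro heq
        -- (k.toNat + d) % c = k.toNat % c with 1 ≤ d < c is impossible
        have hrlt : k.toNat % circle.toNat < circle.toNat := Nat.mod_lt _ (by omega)
        rcases Nat.lt_or_ge (k.toNat % circle.toNat + d) circle.toNat with hcase | hcase
        · have : (k.toNat + d) % circle.toNat = k.toNat % circle.toNat + d := by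
            rw [Nat.add_mod, Nat.mod_eq_of_lt hd, Nat.mod_eq_of_lt hcase]
          omega
        · have h2 : (k.toNat % circle.toNat + d) % circle.toNat
              = k.toNat % circle.toNat + d - circle.toNat := by
            rw [Nat.mod_eq_sub_mod hcase, Nat.mod_eq_of_lt (by omega)]
          have : (k.toNat + d) % circle.toNat = k.toNat % circle.toNat + d - circle.toNat := by
            rw [Nat.add_mod, Nat.mod_eq_of_lt hd, h2]
          omega
      rw [if_neg (by simpa using hne)]
      have hdd : (x :: xs).drop d = xs.drop (d - 1) := by
        conv_lhs => rw [show d = (d - 1) + 1 by omega]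
        exact List.drop_succ_cons ..
      rw [hdd]
      exact ih (k + 1) (d - 1) (by omega) (by omega)
        (by
          have h1 : (k + 1).toNat + (d - 1) = k.toNat + d := by omega
          rw [h1]; exact hsum)

theorem enumerate_fst_nonneg (l : List Int) (k : Int) (hk : 0 ≤ k) :
    ∀ p ∈ PySem.List.enumerate l k, 0 ≤ p.1 := by
  induction l generalizing k with
  | nil => simp [PySem.List.enumerate_nil]
  | cons x xs ih =>
    intro p hp
    rw [PySem.List.enumerate_cons] at hp
    rcases List.mem_cons.mp hp with h | h
    · subst h; exact hk
    · exact ih (k + 1) (by omega) p h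

-- B equals the same flatMap of pvEvery over the residues
theorem sort_shuffle_alt_char (l : List Int) (circle : Int) (hc : 1 ≤ circle) :
    sort_shuffle_alt l circle
      = (List.range circle.toNat).flatMap (fun s => pvEvery circle.toNat (l.drop s)) := by
  unfold sort_shuffle_alt
  rw [if_neg (by omega)]
  have hbuckets :
      (PySem.List.enumerate l 0).foldl
          (fun bs p => bs.modify (PySem.Int.mod p.1 circle).toNat (fun b => b ++ [p.2]))
          (List.replicate circle.toNat [])
        = (List.range circle.toNat).map (fun j => pvEvery circle.toNat (l.drop j)) := by
    apply List.ext_getElem?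
    intro j
    rw [pvBuckets_getElem? circle _ _ j (enumerate_fst_nonneg l 0 (by omega))]
    by_cases hj : j < circle.toNat
    · rw [List.getElem?_eq_getElem (by simpa using hj),
        List.getElem?_eq_getElem (by simpa using hj)]
      simp only [List.getElem_replicate, List.getElem_map, List.getElem_range, Option.map_some]
      rw [pvFilter_enumerate_eq_every circle hc j hj l 0 j (by omega) hj
        (by simpa using Nat.mod_eq_of_lt hj)]
      simp
    · rw [List.getElem?_eq_none (by simpa using Nat.le_of_not_lt hj),
        List.getElem?_eq_none (by simpa using Nat.le_of_not_lt hj)]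
      simp
  rw [hbuckets, PySem.List.foldl_append_eq_flatten, List.nil_append, List.flatMap_def]

-- ===== VERDICT (by name: the statement is the Claim_ definition above) =====
theorem sort_shuffle_spec : Claim_equal_sort_shuffle := by
  intro l circle _
  unfold Spec_sort_shuffle
  by_cases hc : 1 ≤ circle
  · rw [sort_shuffle_char l circle hc, sort_shuffle_alt_char l circle hc]
  · -- circle ≤ 0: A's range is empty, B's guard fires
    unfold sort_shuffle sort_shuffle_alt
    rw [PySem.List.pyRange_one_eq_nil (by omega), if_pos (by omega)]
    simp
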